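-- pv_equiv track=rewrite | github.com/cuihtlauac/odoc-mcp | mcp_server.py | find_module_file
-- ===== SOURCE A (Python) =====
-- from typing import Any, Dict, List, Optional
--
-- def find_module_file(files: List[str], module_path: str) -> Optional[str]:
--     """Find the doc file for a module path like 'Base.List' in the files list.
--
--     Tries several matching strategies:
--     1. Exact suffix match: Base/List/index.html
--     2. Case-insensitive match
--     """
--     # Convert dot path to directory path
--     parts = module_path.split(".")
--     suffix = "/".join(parts) + "/index.html"
--
--     # Try exact match
--     for f in files:
--         if f.endswith(suffix):
--             return f
--
--     # Try case-insensitive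
--     suffix_lower = suffix.lower()
--     for f in files:
--         if f.lower().endswith(suffix_lower):
--             return f
--
--     return None
-- ===== SOURCE B (Python) =====
-- from typing import List, Optional
--
-- def find_module_file(files: List[str], module_path: str) -> Optional[str]:
--     """One fold over the files with a pair accumulator (first exact match,
--     first case-insensitive match), combined at the end; no early return."""
--     suffix = "/".join(module_path.split(".")) + "/index.html"
--     low = suffix.lower()
--     exact: Optional[str] = None
--     ci: Optional[str] = None
--     for f in files:
--         if exact is None and f.endswith(suffix):
--             exact = f
--         if ci is None and f.lower().endswith(low):
--             ci = f
--     return exact if exact is not None else ci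
-- ===== Notes on version B (the rewrite author's own statement) =====
-- stated objective: alternative
-- what changed: Replaces A's two staged linear scans (exact first, then case-insensitive) by a single fold over the files maintaining a pair accumulator (first exact match, first case-insensitive match) with no early return, combining the two at the end.
import Mathlib
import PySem

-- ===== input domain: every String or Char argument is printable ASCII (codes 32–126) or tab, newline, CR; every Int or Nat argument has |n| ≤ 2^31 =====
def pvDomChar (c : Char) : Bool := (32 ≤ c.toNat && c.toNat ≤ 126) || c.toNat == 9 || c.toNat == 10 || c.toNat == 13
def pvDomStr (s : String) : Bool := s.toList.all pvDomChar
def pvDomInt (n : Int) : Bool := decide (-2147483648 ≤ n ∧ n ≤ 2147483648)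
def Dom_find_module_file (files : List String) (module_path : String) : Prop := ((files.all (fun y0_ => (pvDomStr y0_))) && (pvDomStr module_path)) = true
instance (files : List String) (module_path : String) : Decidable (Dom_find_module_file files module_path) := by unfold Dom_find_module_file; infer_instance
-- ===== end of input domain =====

-- B replaces A's two staged scans by one fold with a pair accumulator (first exact,
-- first case-insensitive match), combined afterwards (objective: alternative, same cost).


-- ===== PORT A =====
-- first loop of A: return the first f with f.endswith(suffix)
def pvScanExact (files : List String) (suffix : String) : Option String :=
  match files with
  | [] => none
  | f :: rest => if PySem.Str.endswith f suffix then some f else pvScanExact rest suffix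

-- second loop of A: return the first f with f.lower().endswith(suffix_lower)
def pvScanCI (files : List String) (suffixLower : String) : Option String :=
  match files with
  | [] => none
  | f :: rest =>
    if PySem.Str.endswith (PySem.Str.lower f) suffixLower then some f
    else pvScanCI rest suffixLower

def find_module_file (files : List String) (module_path : String) : Option String :=
  let parts := (PySem.Str.split? module_path ".").getD []  -- sep "." is nonempty, so split? is always some
  let suffix := PySem.Str.join "/" parts ++ "/index.html"
  match pvScanExact files suffix with
  | some f => some f
  | none => pvScanCI files (PySem.Str.lower suffix)

-- ===== PORT B =====
-- B's body: one fold carrying the pair (first exact match so far, first ci match so far)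
def pvStep (suffix low : String) (acc : Option String × Option String) (f : String) :
    Option String × Option String :=
  (if acc.1.isNone && PySem.Str.endswith f suffix then some f else acc.1,
   if acc.2.isNone && PySem.Str.endswith (PySem.Str.lower f) low then some f else acc.2)

def find_module_file_alt (files : List String) (module_path : String) : Option String :=
  let parts := (PySem.Str.split? module_path ".").getD []  -- sep "." is nonempty, so split? is always some
  let suffix := PySem.Str.join "/" parts ++ "/index.html"
  let low := PySem.Str.lower suffix
  match files.foldl (pvStep suffix low) (none, none) with
  | (some e, _) => some e
  | (none, c) => c

-- ===== PRECONDITION & SPEC =====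
def Spec_find_module_file (files : List String) (module_path : String) (out : Option String) : Prop := out = find_module_file_alt files module_path
instance (files : List String) (module_path : String) (out : Option String) : Decidable (Spec_find_module_file files module_path out) := by unfold Spec_find_module_file; infer_instance

-- ===== CLAIM (what is proved, stated in full; the proofs are below) =====
def Claim_equal_find_module_file : Prop := ∀ (files : List String) (module_path : String), Dom_find_module_file files module_path → Spec_find_module_file files module_path (find_module_file files module_path)

-- ===== LEMMAS AND PROOFS =====

-- Invariant of B's fold: each component is "accumulator if already set, else the
-- first match of the corresponding scan".
theorem pvFold_eq (files : List String) (suffix low : String)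
    (acc : Option String × Option String) :
    files.foldl (pvStep suffix low) acc =
      (acc.1.or (pvScanExact files suffix), acc.2.or (pvScanCI files low)) := by
  induction files generalizing acc with
  | nil => simp [pvScanExact, pvScanCI]
  | cons f rest ih =>
    obtain ⟨e, c⟩ := acc
    simp only [List.foldl_cons, ih, pvStep, pvScanExact, pvScanCI]
    cases e <;> cases c <;>
      by_cases he : PySem.Chars.endswith f.toList suffix.toList = true <;>
      by_cases hc : PySem.Chars.endswith (PySem.Chars.lower f.toList) low.toList = true <;>
      simp [PySem.Str.endswith, PySem.Str.lower, he, hc]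

-- ===== VERDICT (by name: the statement is the Claim_ definition above) =====
theorem find_module_file_spec : Claim_equal_find_module_file := by
  intro files module_path _
  unfold Spec_find_module_file find_module_file find_module_file_alt
  simp only [pvFold_eq, Option.none_or]
  cases pvScanExact files _ <;> simp
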